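-- pv_equiv track=rewrite | github.com/cfevrius/CodingBat | solutions/array2.py | ten_run
-- ===== SOURCE A (Python) =====
-- def ten_run(nums):
--     index_of_multiples_of_ten = [(i, val) for i, val in enumerate(nums) if val % 10 == 0]
--     result = nums[:]
--     # index_of_multiples_of_ten = [(1, 10), (4, 20)]
--     for i, v in enumerate(index_of_multiples_of_ten):
--         start = index_of_multiples_of_ten[i][0]
--         end = index_of_multiples_of_ten[i+1][0] if 0 <= i+1 < len(index_of_multiples_of_ten) else len(nums)
--         result[start:end] = (end - start) * [index_of_multiples_of_ten[i][1]]
--     return result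
-- ===== SOURCE B (Python) =====
-- def ten_run(nums):
--     out = []
--     fill = None
--     for val in nums:
--         if val % 10 == 0:
--             fill = val
--         out.append(val if fill is None else fill)
--     return out
-- ===== Notes on version B (the rewrite author's own statement) =====
-- stated objective: simpler
-- what changed: Replaces A's two-phase structure (build an index table of multiples of ten, then rewrite result[start:end] slices for consecutive table entries) with a single streaming pass that carries the current fill value (None until a multiple of ten is seen) and builds the output list directly.
import Mathlib
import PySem

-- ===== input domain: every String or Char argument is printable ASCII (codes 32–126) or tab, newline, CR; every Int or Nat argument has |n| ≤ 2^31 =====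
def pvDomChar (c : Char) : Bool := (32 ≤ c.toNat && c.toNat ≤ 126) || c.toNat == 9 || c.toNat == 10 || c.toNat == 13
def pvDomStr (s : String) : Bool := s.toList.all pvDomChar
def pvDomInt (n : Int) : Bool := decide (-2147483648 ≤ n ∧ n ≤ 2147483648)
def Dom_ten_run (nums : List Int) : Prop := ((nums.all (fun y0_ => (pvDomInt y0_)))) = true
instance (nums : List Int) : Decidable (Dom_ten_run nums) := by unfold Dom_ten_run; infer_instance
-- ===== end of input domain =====

-- B replaces A's index-table-and-slice-assignment structure with a single streaming pass
-- carrying the current fill value (objective: simpler; return value only — neither mutates).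

-- ===== PORT A =====
-- literal port of A: build the (index, value) table of multiples of ten, then for each
-- table entry overwrite result[start:end] with (end-start) copies of the value.
-- Python slice assignment result[start:end] = L is ported as result[:start] ++ L ++ result[end:]
-- (exact: both bounds are nonnegative here); (end-start)*[v] is List.replicate (end-start).toNat v
-- (exact: Python k*[v] has max(k,0) copies, matching Int.toNat).
def ten_run (nums : List Int) : List Int :=
  let pairs := (PySem.List.enumerate nums).filter (fun p => PySem.Int.mod p.2 10 = 0)
  (PySem.List.enumerate pairs).foldl (fun result iv =>
    let i := iv.1
    let start := (PySem.List.pyGetD pairs i (0, 0)).1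
    let stop : Int :=
      if 0 ≤ i + 1 ∧ i + 1 < (pairs.length : Int) then (PySem.List.pyGetD pairs (i + 1) (0, 0)).1
      else (nums.length : Int)
    PySem.List.slice result none (some start) ++
      List.replicate (stop - start).toNat (PySem.List.pyGetD pairs i (0, 0)).2 ++
      PySem.List.slice result (some stop) none) nums

-- ===== PORT B =====
-- B: one pass, carrying the running fill value (None until a multiple of ten is seen).
def tenRunGo (fill : Option Int) : List Int → List Int
  | [] => []
  | v :: rest =>
    let fill' := if PySem.Int.mod v 10 = 0 then some v else fill
    fill'.getD v :: tenRunGo fill' rest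

def ten_run_alt (nums : List Int) : List Int := tenRunGo none nums

-- ===== PRECONDITION & SPEC =====
def Spec_ten_run (nums : List Int) (out : List Int) : Prop := out = ten_run_alt nums
instance (nums : List Int) (out : List Int) : Decidable (Spec_ten_run nums out) := by unfold Spec_ten_run; infer_instance

-- ===== CLAIM (what is proved, stated in full; the proofs are below) =====
def Claim_equal_ten_run : Prop := ∀ (nums : List Int), Dom_ten_run nums → Spec_ten_run nums (ten_run nums)

-- ===== LEMMAS AND PROOFS =====

-- Nat-indexed enumerate (proof-side mirror of PySem.List.enumerate).
def natEnum : List Int → Nat → List (Nat × Int)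
  | [], _ => []
  | v :: r, k => (k, v) :: natEnum r (k + 1)

-- the filtered table, Nat-indexed (10 ∣ v ↔ v % 10 == 0 in Python)
def tbl (xs : List Int) (k : Nat) : List (Nat × Int) :=
  (natEnum xs k).filter (fun p => decide ((10 : Int) ∣ p.2))

-- segments: value v from its own index up to the next table index (or the end e)
def fillSeq (e : Nat) : List (Nat × Int) → List Int
  | [] => []
  | [(s, v)] => List.replicate (e - s) v
  | (s, v) :: (t, w) :: r => List.replicate (t - s) v ++ fillSeq e ((t, w) :: r)

def trip (n : Nat) : List (Nat × Int) → List (Nat × Nat × Int)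
  | [] => []
  | [(s, v)] => [(s, n, v)]
  | (s, v) :: (t, w) :: r => (s, t, v) :: trip n ((t, w) :: r)

def splice (r : List Int) (t : Nat × Nat × Int) : List Int :=
  r.take t.1 ++ List.replicate (t.2.1 - t.1) t.2.2 ++ r.drop t.2.1

def pcast (p : Nat × Int) : Int × Int := ((p.1 : Int), p.2)

theorem natEnum_fst_bounds (xs : List Int) (k : Nat) :
    ∀ p ∈ natEnum xs k, k ≤ p.1 ∧ p.1 < k + xs.length := by
  induction xs generalizing k with
  | nil => simp [natEnum]
  | cons x r ih =>
    intro p hp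
    simp only [natEnum, List.mem_cons] at hp
    rcases hp with h | h
    · subst h; simp
    · have := ih (k + 1) p h
      constructor
      · omega
      · simp only [List.length_cons]; omega

theorem natEnum_pairwise (xs : List Int) (k : Nat) :
    (natEnum xs k).Pairwise (fun p q => p.1 < q.1) := by
  induction xs generalizing k with
  | nil => simp [natEnum]
  | cons x r ih =>
    refine List.pairwise_cons.2 ⟨?_, ih (k + 1)⟩
    intro p hp; exact (natEnum_fst_bounds r (k + 1) p hp).1

theorem tbl_fst_bounds (xs : List Int) (k : Nat) :
    ∀ p ∈ tbl xs k, k ≤ p.1 ∧ p.1 < k + xs.length := by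
  intro p hp; exact natEnum_fst_bounds xs k p (List.mem_of_mem_filter hp)

theorem tbl_pairwise (xs : List Int) (k : Nat) :
    (tbl xs k).Pairwise (fun p q => p.1 < q.1) :=
  (natEnum_pairwise xs k).filter _

theorem enumerate_eq_natEnum (xs : List Int) (k : Nat) :
    PySem.List.enumerate xs (k : Int) = (natEnum xs k).map pcast := by
  induction xs generalizing k with
  | nil => simp [natEnum, PySem.List.enumerate_nil]
  | cons x r ih =>
    have hcast : ((k : Int) + 1) = ((k + 1 : Nat) : Int) := by push_cast; ring
    simp only [natEnum, List.map_cons]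
    rw [PySem.List.enumerate_cons, hcast, ih]
    rfl

theorem tbl_cons_of_dvd (x : Int) (r : List Int) (k : Nat) (hx : (10 : Int) ∣ x) :
    tbl (x :: r) k = (k, x) :: tbl r (k + 1) := by
  simp [tbl, natEnum, hx]

theorem tbl_cons_of_not_dvd (x : Int) (r : List Int) (k : Nat) (hx : ¬ (10 : Int) ∣ x) :
    tbl (x :: r) k = tbl r (k + 1) := by
  simp [tbl, natEnum, hx]

theorem tbl_eq_nil_iff (xs : List Int) (k : Nat) :
    tbl xs k = [] ↔ ∀ v ∈ xs, ¬ (10 : Int) ∣ v := by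
  induction xs generalizing k with
  | nil => simp [tbl, natEnum]
  | cons x r ih =>
    by_cases hx : (10 : Int) ∣ x
    · rw [tbl_cons_of_dvd x r k hx]
      simp only [List.mem_cons]
      constructor
      · intro h; cases h
      · intro h; exact absurd hx (h x (Or.inl rfl))
    · rw [tbl_cons_of_not_dvd x r k hx, ih (k + 1)]
      constructor
      · intro h v hv
        rcases List.mem_cons.1 hv with h' | h'
        · subst h'; exact hx
        · exact h v h'
      · intro h v hv; exact h v (List.mem_cons_of_mem _ hv)

-- B on a multiple-free list
theorem tenRunGo_no_mult (xs : List Int) (h : ∀ v ∈ xs, ¬ (10 : Int) ∣ v) :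
    (tenRunGo none xs = xs) ∧ ∀ c, tenRunGo (some c) xs = List.replicate xs.length c := by
  induction xs with
  | nil => simp [tenRunGo]
  | cons x r ih =>
    have hx := h x (by simp)
    have ih' := ih (fun v hv => h v (by simp [hv]))
    refine ⟨?_, fun c => ?_⟩ <;>
      simp [tenRunGo, hx, ih'.1, ih'.2, List.replicate_succ]

-- B against the table: the two fill states, simultaneously
theorem tenRunGo_tbl (xs : List Int) (k : Nat) (s : Nat) (v : Int) (rest : List (Nat × Int))
    (h : tbl xs k = (s, v) :: rest) :
    tenRunGo none xs = xs.take (s - k) ++ fillSeq (k + xs.length) ((s, v) :: rest) ∧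
    ∀ c, tenRunGo (some c) xs = List.replicate (s - k) c ++ fillSeq (k + xs.length) ((s, v) :: rest) := by
  induction xs generalizing k s v rest with
  | nil => simp [tbl, natEnum] at h
  | cons x r ih =>
    by_cases hx : (10 : Int) ∣ x
    · rw [tbl_cons_of_dvd x r k hx] at h
      have hs : s = k := by injection h with h1 _; injection h1 with h1a _; exact h1a.symm
      have hv : v = x := by injection h with h1 _; injection h1 with _ h1b; exact h1b.symm
      have hrest : rest = tbl r (k + 1) := by injection h with _ h2; exact h2.symm
      have e0 : ∀ f : Option Int, tenRunGo f (x :: r) = x :: tenRunGo (some x) r := by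
        intro f; simp [tenRunGo, hx]
      have key : x :: tenRunGo (some x) r = fillSeq (k + (x :: r).length) ((k, x) :: tbl r (k + 1)) := by
        cases htr : tbl r (k + 1) with
        | nil =>
          have hno := (tbl_eq_nil_iff r (k + 1)).1 htr
          have h2 := (tenRunGo_no_mult r hno).2 x
          simp only [fillSeq, h2, List.length_cons]
          rw [show k + (r.length + 1) - k = r.length + 1 by omega, List.replicate_succ]
        | cons q rest' =>
          obtain ⟨t, w⟩ := q
          have hb := (tbl_fst_bounds r (k + 1) (t, w) (by rw [htr]; simp)).1
          have h2 := ((ih (k + 1) t w rest' htr).2) x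
          simp only [fillSeq, h2, List.length_cons]
          rw [show (k + 1) + r.length = k + (r.length + 1) by omega]
          rw [show (t - k) = (t - (k + 1)) + 1 by omega, List.replicate_succ]
          simp
      constructor
      · rw [hs, hv, hrest]
        simp only [Nat.sub_self, List.take_zero, List.nil_append]
        rw [e0 none]; exact key
      · intro c
        rw [hs, hv, hrest]
        simp only [Nat.sub_self, List.replicate_zero, List.nil_append]
        rw [e0 (some c)]; exact key
    · rw [tbl_cons_of_not_dvd x r k hx] at h
      have hb := (tbl_fst_bounds r (k + 1) (s, v) (by rw [h]; simp)).1
      have ih' := ih (k + 1) s v rest h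
      constructor
      · have e1 : tenRunGo none (x :: r) = x :: tenRunGo none r := by simp [tenRunGo, hx]
        rw [e1, ih'.1, show (s - k) = (s - (k + 1)) + 1 by omega]
        simp only [List.take_succ_cons, List.cons_append, List.length_cons]
        rw [show (k + 1) + r.length = k + (r.length + 1) by omega]
      · intro c
        have e2 : tenRunGo (some c) (x :: r) = c :: tenRunGo (some c) r := by simp [tenRunGo, hx]
        rw [e2, ih'.2 c, show (s - k) = (s - (k + 1)) + 1 by omega, List.replicate_succ]
        simp only [List.cons_append, List.length_cons]
        rw [show (k + 1) + r.length = k + (r.length + 1) by omega]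

theorem take_len_append {α : Type} (A C : List α) (n : Nat) (h : A.length = n) :
    (A ++ C).take n = A := by
  subst h; simp

theorem splice_length (r : List Int) (s t : Nat) (v : Int) (hs : s ≤ t) (ht : t ≤ r.length) :
    (splice r (s, t, v)).length = r.length := by
  simp [splice]; omega

-- the splice fold computes take-prefix ++ segments
theorem splice_fold (ps : List (Nat × Int)) (n : Nat) :
    ∀ r : List Int, r.length = n →
      ps.Pairwise (fun p q => p.1 < q.1) → (∀ p ∈ ps, p.1 < n) →
      (trip n ps).foldl splice r =
        match ps with
        | [] => r
        | (s, _) :: _ => r.take s ++ fillSeq n ps := by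
  induction ps with
  | nil => intro r _ _ _; simp [trip]
  | cons q rest ih =>
    obtain ⟨s, v⟩ := q
    intro r hr hpw hb
    cases rest with
    | nil =>
      simp only [trip, fillSeq, List.foldl_cons, List.foldl_nil, splice]
      rw [show r.drop n = [] from by rw [← hr, List.drop_length], List.append_nil]
    | cons q' rest' =>
      obtain ⟨t, w⟩ := q'
      have hst : s < t := (List.pairwise_cons.1 hpw).1 (t, w) (by simp)
      have htn : t < n := hb (t, w) (by simp)
      simp only [trip, List.foldl_cons]
      have hlen : (splice r (s, t, v)).length = n := by
        rw [splice_length r s t v (by omega) (by omega)]; exact hr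
      have ihres := ih (splice r (s, t, v)) hlen (List.pairwise_cons.1 hpw).2
        (fun p hp => hb p (by simp [hp]))
      rw [ihres]
      simp only
      have hA : (r.take s ++ List.replicate (t - s) v).length = t := by
        simp; omega
      have htake : (splice r (s, t, v)).take t = r.take s ++ List.replicate (t - s) v := by
        simp only [splice]
        exact take_len_append _ _ t hA
      rw [htake, fillSeq, List.append_assoc]

-- lookup at a split point of an append
theorem getD_append_cons {α : Type} (l₁ l₂ : List α) (a : α) (d : α) :
    (l₁ ++ a :: l₂).getD l₁.length d = a := by
  simp [List.getD]

-- A's fold over the Int-enumerated table equals the splice fold over trip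
theorem foldA_eq_splice_fold (n : Nat) (ps : List (Nat × Int)) (suf : List (Nat × Int)) :
    ∀ (pre : List (Nat × Int)) (r : List Int), ps = pre ++ suf →
      (PySem.List.enumerate (suf.map pcast) (pre.length : Int)).foldl
        (fun result iv =>
          let i := iv.1
          let start := (PySem.List.pyGetD (ps.map pcast) i (0, 0)).1
          let stop : Int :=
            if 0 ≤ i + 1 ∧ i + 1 < ((ps.map pcast).length : Int) then
              (PySem.List.pyGetD (ps.map pcast) (i + 1) (0, 0)).1
            else (n : Int)
          PySem.List.slice result none (some start) ++
            List.replicate (stop - start).toNat (PySem.List.pyGetD (ps.map pcast) i (0, 0)).2 ++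
            PySem.List.slice result (some stop) none) r
      = (trip n suf).foldl splice r := by
  induction suf with
  | nil => intro pre r _; simp [trip, PySem.List.enumerate_nil]
  | cons q suf' ih =>
    obtain ⟨s, v⟩ := q
    intro pre r hps
    rw [List.map_cons, PySem.List.enumerate_cons, List.foldl_cons]
    have hsplit : ps.map pcast = (pre.map pcast) ++ pcast (s, v) :: suf'.map pcast := by
      rw [hps]; simp
    have hlen1 : (pre.map pcast).length = pre.length := by simp
    have hget0 : PySem.List.pyGetD (ps.map pcast) ((pre.length : Nat) : Int) (0, 0) = ((s : Int), v) := by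
      rw [PySem.List.pyGetD_natCast, hsplit, ← hlen1, getD_append_cons]
      rfl
    have hbody : ∀ res : List Int,
        (PySem.List.slice res none (some (PySem.List.pyGetD (ps.map pcast) ((pre.length : Nat) : Int) (0, 0)).1) ++
          List.replicate (((if 0 ≤ ((pre.length : Nat) : Int) + 1 ∧ ((pre.length : Nat) : Int) + 1 < ((ps.map pcast).length : Int) then
              (PySem.List.pyGetD (ps.map pcast) (((pre.length : Nat) : Int) + 1) (0, 0)).1
            else (n : Int)) - (PySem.List.pyGetD (ps.map pcast) ((pre.length : Nat) : Int) (0, 0)).1)).toNat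
            (PySem.List.pyGetD (ps.map pcast) ((pre.length : Nat) : Int) (0, 0)).2 ++
          PySem.List.slice res (some ((if 0 ≤ ((pre.length : Nat) : Int) + 1 ∧ ((pre.length : Nat) : Int) + 1 < ((ps.map pcast).length : Int) then
              (PySem.List.pyGetD (ps.map pcast) (((pre.length : Nat) : Int) + 1) (0, 0)).1
            else (n : Int)))) none)
        = splice res ((trip n ((s, v) :: suf')).headI) := by
      intro res
      cases suf' with
      | nil =>
        have hcond : ¬ (0 ≤ ((pre.length : Nat) : Int) + 1 ∧ ((pre.length : Nat) : Int) + 1 < ((ps.map pcast).length : Int)) := by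
          rw [hps]; simp
        rw [if_neg hcond, hget0]
        simp only [trip, List.headI, splice]
        rw [PySem.List.slice_to_natCast, PySem.List.slice_from_natCast, Int.toNat_sub]
      | cons q' suf'' =>
        obtain ⟨t, w⟩ := q'
        have hcond : (0 ≤ ((pre.length : Nat) : Int) + 1 ∧ ((pre.length : Nat) : Int) + 1 < ((ps.map pcast).length : Int)) := by
          rw [hps]; exact ⟨by omega, by simp⟩
        have hget1 : PySem.List.pyGetD (ps.map pcast) (((pre.length : Nat) : Int) + 1) (0, 0) = ((t : Int), w) := by
          have : (((pre.length : Nat) : Int) + 1) = (((pre.length + 1 : Nat)) : Int) := by push_cast; ring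
          rw [this, PySem.List.pyGetD_natCast]
          have hsplit2 : ps.map pcast = (pre.map pcast ++ [pcast (s, v)]) ++ pcast (t, w) :: suf''.map pcast := by
            rw [hps]; simp
          have hlen2 : (pre.map pcast ++ [pcast (s, v)]).length = pre.length + 1 := by simp
          rw [hsplit2, ← hlen2, getD_append_cons]
          rfl
        rw [if_pos hcond, hget0, hget1]
        simp only [trip, List.headI, splice]
        rw [PySem.List.slice_to_natCast, PySem.List.slice_from_natCast, Int.toNat_sub]
    rw [hbody r]
    have hstep : ((pre.length : Nat) : Int) + 1 = (((pre ++ [(s, v)]).length : Nat) : Int) := by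
      simp
    rw [hstep, ih (pre ++ [(s, v)]) (splice r ((trip n ((s, v) :: suf')).headI)) (by rw [hps]; simp)]
    cases suf' with
    | nil => simp [trip, List.headI]
    | cons q' suf'' =>
      obtain ⟨t, w⟩ := q'
      simp [trip, List.headI]

-- ===== VERDICT (by name: the statement is the Claim_ definition above) =====
theorem ten_run_spec : Claim_equal_ten_run := by
  intro nums _
  unfold Spec_ten_run ten_run ten_run_alt
  have henum : PySem.List.enumerate nums 0 = (natEnum nums 0).map pcast := by
    have h := enumerate_eq_natEnum nums 0
    simpa using h
  have hpred : (fun p : Int × Int => decide (PySem.Int.mod p.2 10 = 0)) =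
      (fun p : Int × Int => decide ((10 : Int) ∣ p.2)) := by
    funext p; simp
  have hpairs : (PySem.List.enumerate nums 0).filter (fun p => PySem.Int.mod p.2 10 = 0)
      = (tbl nums 0).map pcast := by
    rw [henum, hpred, List.filter_map]
    rfl
  simp only [hpairs]
  have hfold := foldA_eq_splice_fold nums.length (tbl nums 0) (tbl nums 0) [] nums (by simp)
  simp only [List.length_nil, Nat.cast_zero] at hfold
  rw [hfold]
  rw [splice_fold (tbl nums 0) nums.length nums rfl (tbl_pairwise nums 0)
    (fun p hp => by have := (tbl_fst_bounds nums 0 p hp).2; omega)]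
  cases htbl : tbl nums 0 with
  | nil =>
    simp only
    exact ((tenRunGo_no_mult nums ((tbl_eq_nil_iff nums 0).1 htbl)).1).symm
  | cons q rest =>
    obtain ⟨s, v⟩ := q
    simp only
    have hB := (tenRunGo_tbl nums 0 s v rest htbl).1
    rw [hB]
    simp
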